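-- pv_equiv track=rewrite | github.com/ftang1996/CS122 | rosalind/ba1e.py | to_pattern
-- ===== SOURCE A (Python) =====
-- def to_nucleotide(number):
--     symbols = {0: "A", 1: "C", 2: "G", 3: "T"}
--     return symbols[number]
--
-- def to_pattern(code, k):
--     if k == 1:
--         return to_nucleotide(code)
--     pre_index = code // 4
--     remainder = code % 4
--     symbol = to_nucleotide(remainder)
--     pre_pattern = to_pattern(pre_index, k - 1)
--     return pre_pattern + symbol
-- ===== SOURCE B (Python) =====
-- def to_pattern(code, k):
--     symbols = {0: "A", 1: "C", 2: "G", 3: "T"}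
--     digits = []
--     for _ in range(k - 1):
--         digits.append(symbols[code % 4])
--         code //= 4
--     digits.append(symbols[code])
--     return "".join(reversed(digits))
-- ===== Notes on version B (the rewrite author's own statement) =====
-- stated objective: idiomatic
-- what changed: Replaces A's recursion (recurse on code//4, append the last symbol after the recursive call) by an explicit iterative loop that collects the base-4 digit symbols least-significant-first into a list and joins them reversed; same O(k) cost.
import Mathlib
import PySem

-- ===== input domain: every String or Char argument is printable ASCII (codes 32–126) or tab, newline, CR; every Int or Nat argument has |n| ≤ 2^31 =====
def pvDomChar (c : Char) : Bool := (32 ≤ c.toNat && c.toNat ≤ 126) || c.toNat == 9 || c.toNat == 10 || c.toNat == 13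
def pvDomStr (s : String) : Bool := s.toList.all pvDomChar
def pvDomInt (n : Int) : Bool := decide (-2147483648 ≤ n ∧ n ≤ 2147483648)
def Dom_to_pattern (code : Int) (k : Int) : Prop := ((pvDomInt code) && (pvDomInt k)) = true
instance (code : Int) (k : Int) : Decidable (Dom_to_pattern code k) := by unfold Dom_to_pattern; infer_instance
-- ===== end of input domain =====

-- B replaces A's recursion by an iterative digit loop joined in reverse; same O(k) work, equivalence of return values proved on Pre_.

-- ===== PORT A =====
-- symbols[number]; Python raises KeyError outside {0,1,2,3} — those inputs are excluded by Pre_, the port returns "" there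
def to_nucleotide (number : Int) : String :=
  let symbols : PySem.Dict Int String := PySem.Dict.ofList [(0, "A"), (1, "C"), (2, "G"), (3, "T")]
  (symbols.get? number).getD ""

-- guard 'k ≤ 1' (instead of Python's 'k == 1') only makes the recursion total: for k ≤ 0 Python diverges (RecursionError), excluded by Pre_
def to_pattern (code : Int) (k : Int) : String :=
  if k ≤ 1 then to_nucleotide code
  else
    let pre_index := PySem.Int.floordiv code 4
    let remainder := PySem.Int.mod code 4
    let symbol := to_nucleotide remainder
    let pre_pattern := to_pattern pre_index (k - 1)
    pre_pattern ++ symbol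
termination_by (k - 1).toNat
decreasing_by omega

-- ===== PORT B =====
def to_pattern_alt (code : Int) (k : Int) : String :=
  let symbols : PySem.Dict Int String := PySem.Dict.ofList [(0, "A"), (1, "C"), (2, "G"), (3, "T")]
  let st := (List.range (k - 1).toNat).foldl
      (fun (st : List String × Int) _ =>
        (st.1 ++ [(symbols.get? (PySem.Int.mod st.2 4)).getD ""], PySem.Int.floordiv st.2 4))
      ([], code)
  PySem.Str.join "" ((st.1 ++ [(symbols.get? st.2).getD ""]).reverse)

-- ===== PRECONDITION & SPEC =====
-- Pre_ = exactly the inputs Python A returns on: k ≥ 1 (else infinite recursion) and 0 ≤ code < 4^k (else some recursive lookup hits KeyError)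
def Pre_to_pattern (code : Int) (k : Int) : Prop := 1 ≤ k ∧ 0 ≤ code ∧ code < 4 ^ k.toNat
instance (code : Int) (k : Int) : Decidable (Pre_to_pattern code k) := by unfold Pre_to_pattern; infer_instance
def pvWitness_to_pattern : Int × Int := (11, 2)

def Spec_to_pattern (code : Int) (k : Int) (out : String) : Prop := out = to_pattern_alt code k
instance (code : Int) (k : Int) (out : String) : Decidable (Spec_to_pattern code k out) := by unfold Spec_to_pattern; infer_instance

-- ===== CLAIM (what is proved, stated in full; the proofs are below) =====
def Claim_equal_to_pattern : Prop := ∀ (code : Int) (k : Int), Dom_to_pattern code k → Pre_to_pattern code k → Spec_to_pattern code k (to_pattern code k)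

-- ===== LEMMAS AND PROOFS =====

theorem pv_join_cons (a : List Char) (l : List (List Char)) :
    PySem.Chars.join [] (a :: l) = a ++ PySem.Chars.join [] l := by
  cases l with
  | nil => simp [PySem.Chars.join_nil, PySem.Chars.join_singleton]
  | cons b t => rw [PySem.Chars.join_cons_cons]; simp

theorem to_pattern_base (code k : Int) (hk : k ≤ 1) :
    to_pattern code k = to_nucleotide code := by
  rw [to_pattern, if_pos hk]

theorem to_pattern_step (code k : Int) (hk : 2 ≤ k) :
    to_pattern code k = to_pattern (PySem.Int.floordiv code 4) (k - 1) ++ to_nucleotide (PySem.Int.mod code 4) := by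
  rw [to_pattern, if_neg (by omega : ¬ k ≤ 1)]

theorem pv_fold (l : List Nat) : ∀ (code : Int) (digits : List String),
    PySem.Chars.join []
      (((l.foldl
            (fun (st : List String × Int) _ =>
              (st.1 ++ [((PySem.Dict.ofList [((0:Int), "A"), (1, "C"), (2, "G"), (3, "T")]).get? (PySem.Int.mod st.2 4)).getD ""],
               PySem.Int.floordiv st.2 4))
            (digits, code)).1 ++
          [((PySem.Dict.ofList [((0:Int), "A"), (1, "C"), (2, "G"), (3, "T")]).get?
              (l.foldl
                (fun (st : List String × Int) _ =>
                  (st.1 ++ [((PySem.Dict.ofList [((0:Int), "A"), (1, "C"), (2, "G"), (3, "T")]).get? (PySem.Int.mod st.2 4)).getD ""],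
                   PySem.Int.floordiv st.2 4))
                (digits, code)).2).getD ""]).reverse.map String.toList)
    = (to_pattern code ((l.length : Int) + 1)).toList ++ PySem.Chars.join [] (digits.reverse.map String.toList) := by
  induction l with
  | nil =>
    intro code digits
    simp only [List.foldl_nil, List.length_nil, Nat.cast_zero, zero_add]
    rw [to_pattern_base code 1 (by omega)]
    simp [to_nucleotide, pv_join_cons]
  | cons a t ih =>
    intro code digits
    simp only [List.foldl_cons, List.length_cons]
    rw [ih]
    rw [to_pattern_step code (((t.length + 1 : Nat) : Int) + 1) (by push_cast; omega)]
    have e1 : ((t.length + 1 : Nat) : Int) + 1 - 1 = (t.length : Int) + 1 := by push_cast; ring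
    rw [e1]
    simp [to_nucleotide, pv_join_cons, String.toList_append, List.append_assoc]

theorem to_pattern_agree : ∀ (code k : Int), to_pattern code k = to_pattern_alt code k := by
  intro code k
  apply String.toList_inj.mp
  rw [to_pattern_alt]
  simp only [PySem.Str.toList_join]
  rw [String.toList_empty]
  have h := pv_fold (List.range (k - 1).toNat) code []
  simp only [List.length_range, List.reverse_nil, List.map_nil, PySem.Chars.join_nil,
    List.append_nil] at h
  rw [h]
  by_cases hk : 1 ≤ k
  · have e : (((k - 1).toNat : Int) + 1) = k := by omega
    rw [e]
  · have e : (((k - 1).toNat : Int) + 1) = 1 := by omega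
    rw [e, to_pattern_base code k (by omega), to_pattern_base code 1 (by omega)]

-- ===== VERDICT (by name: the statement is the Claim_ definition above) =====
theorem to_pattern_spec : Claim_equal_to_pattern := by
  intro code k _ _
  unfold Spec_to_pattern
  exact to_pattern_agree code k
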